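-- pv_equiv track=rewrite | github.com/keechow/project-num-num | num_range_count.py | count5D_numrange
-- ===== SOURCE A (Python) =====
-- def num_range_counter(data):
-- 	ctr= {"0":0, "1":0, "2":0, "3":0, "4":0, "5":0, "6":0, "7":0,"8":0, "9":0}
-- 	first_digit = data[0]
-- 	if first_digit in ctr:
-- 		ctr[first_digit] += 1
-- 	return ctr
--
-- def count5D_numrange(data):
--
-- 	ctr1= {"0":0, "1":0, "2":0, "3":0, "4":0, "5":0, "6":0, "7":0,"8":0, "9":0}
-- 	ctr2= {"0":0, "1":0, "2":0, "3":0, "4":0, "5":0, "6":0, "7":0,"8":0, "9":0}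
-- 	ctr3= {"0":0, "1":0, "2":0, "3":0, "4":0, "5":0, "6":0, "7":0,"8":0, "9":0}
-- 	    #store counts for each digit drawn for prize 1,2,3
--
-- 	for each_data_set in data:
-- 		result1 = each_data_set[1] #prize 1
-- 		result2 = each_data_set[2] #prize 2
-- 		result3 = each_data_set[3] #prize 3
--
-- 		result_ctr_dict1 = num_range_counter(result1)
-- 		result_ctr_dict2 = num_range_counter(result2)
-- 		result_ctr_dict3 = num_range_counter(result3)
--
-- 		for each_num_ctr in result_ctr_dict1:
-- 			if each_num_ctr in ctr1:
-- 				ctr1[each_num_ctr] += result_ctr_dict1[each_num_ctr]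
--
-- 		for each_num_ctr in result_ctr_dict2:
-- 			if each_num_ctr in ctr2:
-- 				ctr2[each_num_ctr] += result_ctr_dict2[each_num_ctr]
--
-- 		for each_num_ctr in result_ctr_dict3:
-- 			if each_num_ctr in ctr3:
-- 				ctr3[each_num_ctr] += result_ctr_dict3[each_num_ctr]
--
-- 	prize1_count = [0,0,0,0,0,0,0,0,0,0]
-- 	prize2_count = [0,0,0,0,0,0,0,0,0,0]
-- 	prize3_count = [0,0,0,0,0,0,0,0,0,0]
--
-- 	for each in ctr1:
-- 		position = int(each)
-- 		prize1_count[position] = ctr1[each]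
--
-- 	for each in ctr2:
-- 		position = int(each)
-- 		prize2_count[position] = ctr2[each]
--
-- 	for each in ctr3:
-- 		position = int(each)
-- 		prize3_count[position] = ctr3[each]
--
-- 	return [prize1_count,prize2_count,prize3_count]
-- ===== SOURCE B (Python) =====
-- def count5D_numrange(data):
--     prize1_count = [0] * 10
--     prize2_count = [0] * 10
--     prize3_count = [0] * 10
--     for each_data_set in data:
--         for col, counts in ((1, prize1_count), (2, prize2_count), (3, prize3_count)):
--             ch = each_data_set[col][0]
--             if ch in "0123456789":
--                 counts[int(ch)] += 1
--     return [prize1_count, prize2_count, prize3_count]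
-- ===== Notes on version B (the rewrite author's own statement) =====
-- stated objective: simpler
-- what changed: B drops the helper and all dict machinery: instead of building a fresh per-row digit dict, merging it into three accumulator dicts and finally converting each dict to a list by int(key) indexing, B keeps three flat [0]*10 count lists and bumps the int(char) slot directly in a single pass over the rows.
import Mathlib
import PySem

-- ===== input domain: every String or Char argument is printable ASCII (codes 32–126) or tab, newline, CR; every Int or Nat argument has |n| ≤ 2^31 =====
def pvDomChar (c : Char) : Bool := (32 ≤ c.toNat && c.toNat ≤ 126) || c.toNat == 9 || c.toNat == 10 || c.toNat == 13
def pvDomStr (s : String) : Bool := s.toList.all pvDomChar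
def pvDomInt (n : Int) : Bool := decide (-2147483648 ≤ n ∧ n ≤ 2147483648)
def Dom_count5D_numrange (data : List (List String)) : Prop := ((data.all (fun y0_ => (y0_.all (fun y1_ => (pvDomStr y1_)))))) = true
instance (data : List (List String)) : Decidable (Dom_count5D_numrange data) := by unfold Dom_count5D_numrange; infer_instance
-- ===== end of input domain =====

-- B replaces A's per-row digit dicts, merge loops and dict->list conversion passes by three
-- flat count lists bumped in a single pass (objective: simpler).

-- ===== PORT A =====
-- the literal dict {"0":0, …, "9":0}
def pvBaseCtr : PySem.Dict String Int :=
  PySem.Dict.ofList [("0",0),("1",0),("2",0),("3",0),("4",0),("5",0),("6",0),("7",0),("8",0),("9",0)]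

def num_range_counter (data : String) : PySem.Dict String Int :=
  let ctr := pvBaseCtr
  match PySem.Str.pyGet? data 0 with
  | none => ctr   -- data[0] on an empty string: Python raises IndexError (excluded by Pre_)
  | some c =>
    let first_digit := String.ofList [c]
    if ctr.contains first_digit then ctr.modify first_digit 0 (· + 1) else ctr

-- the 'for each_num_ctr in result_ctr_dictN: if each_num_ctr in ctrN: ctrN[...] += ...' loop
def pvMerge (ctr rd : PySem.Dict String Int) : PySem.Dict String Int :=
  rd.keys.foldl (fun c k => if c.contains k then c.modify k 0 (· + rd.getD k 0) else c) ctr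

-- 'for each in ctr: position = int(each); prize_count[position] = ctr[each]'
def pvToList (ctr : PySem.Dict String Int) : List Int :=
  ctr.keys.foldl (fun lst k =>
    PySem.List.pySetD lst ((PySem.Int.ofStr? k).getD 0) (ctr.getD k 0)) [0,0,0,0,0,0,0,0,0,0]

def pvStepA (st : PySem.Dict String Int × PySem.Dict String Int × PySem.Dict String Int)
    (each_data_set : List String) :
    PySem.Dict String Int × PySem.Dict String Int × PySem.Dict String Int :=
  match PySem.List.pyGet? each_data_set 1, PySem.List.pyGet? each_data_set 2,
        PySem.List.pyGet? each_data_set 3 with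
  | some result1, some result2, some result3 =>
      (pvMerge st.1 (num_range_counter result1),
       pvMerge st.2.1 (num_range_counter result2),
       pvMerge st.2.2 (num_range_counter result3))
  | _, _, _ => st   -- row shorter than 4: Python raises IndexError (excluded by Pre_)

def count5D_numrange (data : List (List String)) : List (List Int) :=
  let fin := data.foldl pvStepA (pvBaseCtr, pvBaseCtr, pvBaseCtr)
  [pvToList fin.1, pvToList fin.2.1, pvToList fin.2.2]

-- ===== PORT B =====
-- 'if ch in "0123456789": counts[int(ch)] += 1'
def pvBumpChar (p : List Int) (ch : Char) : List Int :=
  if ch ∈ "0123456789".toList then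
    let i := (PySem.Int.ofStr? (String.ofList [ch])).getD 0
    PySem.List.pySetD p i (PySem.List.pyGetD p i 0 + 1)
  else p

-- one (col, counts) iteration of B's inner loop: ch = each_data_set[col][0]; …
def pvColB (p : List Int) (row : List String) (col : Int) : List Int :=
  match PySem.List.pyGet? row col with
  | none => p   -- IndexError in Python (excluded by Pre_)
  | some s =>
    match PySem.Str.pyGet? s 0 with
    | none => p   -- IndexError in Python (excluded by Pre_)
    | some ch => pvBumpChar p ch

def count5D_numrange_alt (data : List (List String)) : List (List Int) :=
  let fin := data.foldl
    (fun (st : List Int × List Int × List Int) row =>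
      (pvColB st.1 row 1, pvColB st.2.1 row 2, pvColB st.2.2 row 3))
    ([0,0,0,0,0,0,0,0,0,0], [0,0,0,0,0,0,0,0,0,0], [0,0,0,0,0,0,0,0,0,0])
  [fin.1, fin.2.1, fin.2.2]

-- ===== PRECONDITION & SPEC =====
-- Pre_ excludes exactly the inputs where A raises IndexError: a row with fewer than 4 entries,
-- or an empty string in one of the three prize columns.
def Pre_count5D_numrange (data : List (List String)) : Prop :=
  ∀ row ∈ data, 4 ≤ row.length ∧ row.getD 1 "" ≠ "" ∧ row.getD 2 "" ≠ "" ∧ row.getD 3 "" ≠ ""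

instance (data : List (List String)) : Decidable (Pre_count5D_numrange data) := by
  unfold Pre_count5D_numrange; infer_instance

def pvWitness_count5D_numrange : List (List String) := [["id", "12", "7x", "a9"]]

def Spec_count5D_numrange (data : List (List String)) (out : List (List Int)) : Prop :=
  out = count5D_numrange_alt data
instance (data : List (List String)) (out : List (List Int)) : Decidable (Spec_count5D_numrange data out) := by
  unfold Spec_count5D_numrange; infer_instance

-- ===== CLAIM (what is proved, stated in full; the proofs are below) =====
def Claim_equal_count5D_numrange : Prop := ∀ (data : List (List String)), Dom_count5D_numrange data → Pre_count5D_numrange data → Spec_count5D_numrange data (count5D_numrange data)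

-- ===== LEMMAS AND PROOFS =====

-- the A-side dict whose values are the entries of a count list
def mkCL (l : List Int) : PySem.Dict String Int :=
  PySem.Dict.mk [("0", l.getD 0 0),("1", l.getD 1 0),("2", l.getD 2 0),("3", l.getD 3 0),("4", l.getD 4 0),
                 ("5", l.getD 5 0),("6", l.getD 6 0),("7", l.getD 7 0),("8", l.getD 8 0),("9", l.getD 9 0)]

lemma pvLitBeq (d c : Char) : ((String.ofList [d] : String) == String.ofList [c]) = (c == d) := by
  by_cases h : c = d
  · subst h; simp
  · have hne : String.ofList [d] ≠ String.ofList [c] := by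
      intro he; exact h (by have := congrArg String.toList he; simpa using this.symm)
    simp [hne, h]

lemma pvB0 (c : Char) : (("0" : String) == String.ofList [c]) = (c == '0') := pvLitBeq '0' c
lemma pvB1 (c : Char) : (("1" : String) == String.ofList [c]) = (c == '1') := pvLitBeq '1' c
lemma pvB2 (c : Char) : (("2" : String) == String.ofList [c]) = (c == '2') := pvLitBeq '2' c
lemma pvB3 (c : Char) : (("3" : String) == String.ofList [c]) = (c == '3') := pvLitBeq '3' c
lemma pvB4 (c : Char) : (("4" : String) == String.ofList [c]) = (c == '4') := pvLitBeq '4' c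
lemma pvB5 (c : Char) : (("5" : String) == String.ofList [c]) = (c == '5') := pvLitBeq '5' c
lemma pvB6 (c : Char) : (("6" : String) == String.ofList [c]) = (c == '6') := pvLitBeq '6' c
lemma pvB7 (c : Char) : (("7" : String) == String.ofList [c]) = (c == '7') := pvLitBeq '7' c
lemma pvB8 (c : Char) : (("8" : String) == String.ofList [c]) = (c == '8') := pvLitBeq '8' c
lemma pvB9 (c : Char) : (("9" : String) == String.ofList [c]) = (c == '9') := pvLitBeq '9' c

lemma pvI0 : PySem.Int.ofChars? ['0'] = some 0 := by decide
lemma pvI1 : PySem.Int.ofChars? ['1'] = some 1 := by decide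
lemma pvI2 : PySem.Int.ofChars? ['2'] = some 2 := by decide
lemma pvI3 : PySem.Int.ofChars? ['3'] = some 3 := by decide
lemma pvI4 : PySem.Int.ofChars? ['4'] = some 4 := by decide
lemma pvI5 : PySem.Int.ofChars? ['5'] = some 5 := by decide
lemma pvI6 : PySem.Int.ofChars? ['6'] = some 6 := by decide
lemma pvI7 : PySem.Int.ofChars? ['7'] = some 7 := by decide
lemma pvI8 : PySem.Int.ofChars? ['8'] = some 8 := by decide
lemma pvI9 : PySem.Int.ofChars? ['9'] = some 9 := by decide

lemma pvNrcEq (s : String) (c : Char) (hs : PySem.Str.pyGet? s 0 = some c) :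
    num_range_counter s = (if pvBaseCtr.contains (String.ofList [c])
      then pvBaseCtr.modify (String.ofList [c]) 0 (· + 1) else pvBaseCtr) := by
  simp only [num_range_counter, hs]

lemma pvStep (a0 a1 a2 a3 a4 a5 a6 a7 a8 a9 : Int) (s : String) (c : Char)
    (hs : PySem.Str.pyGet? s 0 = some c) :
    pvMerge (mkCL [a0,a1,a2,a3,a4,a5,a6,a7,a8,a9]) (num_range_counter s)
      = mkCL (pvBumpChar [a0,a1,a2,a3,a4,a5,a6,a7,a8,a9] c) := by
  have hd : ("0123456789" : String).toList = ['0','1','2','3','4','5','6','7','8','9'] := by decide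
  rw [pvNrcEq s c hs]
  by_cases h : c ∈ ("0123456789" : String).toList
  · rw [hd] at h
    fin_cases h <;>
      simp [pvMerge, pvBaseCtr, mkCL, pvBumpChar, hd, pvI0,pvI1,pvI2,pvI3,pvI4,pvI5,pvI6,pvI7,pvI8,pvI9,
        PySem.Dict.modify, PySem.Dict.contains, PySem.Dict.keys, PySem.Dict.getD,
        PySem.Dict.get?, PySem.Dict.ofList, PySem.Dict.update, PySem.Dict.insert, PySem.Dict.empty,
        PySem.List.pySetD, PySem.List.pySet?, PySem.List.pyGetD, PySem.List.pyGet?, PySem.List.pyIdx?,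
        PySem.Int.ofStr?]
  · rw [hd] at h
    simp only [List.mem_cons, List.not_mem_nil, or_false, not_or] at h
    obtain ⟨h0,h1,h2,h3,h4,h5,h6,h7,h8,h9⟩ := h
    simp [pvMerge, pvBaseCtr, mkCL, pvBumpChar, hd,
      pvB0, pvB1, pvB2, pvB3, pvB4, pvB5, pvB6, pvB7, pvB8, pvB9,
      h0,h1,h2,h3,h4,h5,h6,h7,h8,h9,
      PySem.Dict.modify, PySem.Dict.contains, PySem.Dict.keys, PySem.Dict.getD,
      PySem.Dict.get?, PySem.Dict.ofList, PySem.Dict.update, PySem.Dict.insert, PySem.Dict.empty]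

lemma pvTen (l : List Int) (h : l.length = 10) :
    ∃ a0 a1 a2 a3 a4 a5 a6 a7 a8 a9 : Int, l = [a0,a1,a2,a3,a4,a5,a6,a7,a8,a9] := by
  match l, h with
  | [a0,a1,a2,a3,a4,a5,a6,a7,a8,a9], _ =>
    exact ⟨a0,a1,a2,a3,a4,a5,a6,a7,a8,a9, rfl⟩

lemma pvStepL (l : List Int) (hl : l.length = 10) (s : String) (c : Char)
    (hs : PySem.Str.pyGet? s 0 = some c) :
    pvMerge (mkCL l) (num_range_counter s) = mkCL (pvBumpChar l c) := by
  obtain ⟨a0,a1,a2,a3,a4,a5,a6,a7,a8,a9, rfl⟩ := pvTen l hl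
  exact pvStep a0 a1 a2 a3 a4 a5 a6 a7 a8 a9 s c hs

lemma pvBumpLen (p : List Int) (c : Char) : (pvBumpChar p c).length = p.length := by
  unfold pvBumpChar
  split
  · simp [PySem.List.length_pySetD]
  · rfl

lemma pvHead (s : String) (h : s ≠ "") : ∃ c, PySem.Str.pyGet? s 0 = some c := by
  have hne : s.toList ≠ [] := by
    intro hl
    exact h (by have := congrArg String.ofList hl; simpa using this)
  cases hcl : s.toList with
  | nil => exact absurd hcl hne
  | cons c cs => exact ⟨c, by simp [PySem.Str.pyGet?, PySem.Chars.pyGet?_eq_listPyGet?, hcl]⟩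

lemma pvRowGet (row : List String) (h : 4 ≤ row.length) (i : Nat) (hi : i < 4) :
    PySem.List.pyGet? row (i : Int) = some (row.getD i "") := by
  have hlt : i < row.length := by omega
  rw [PySem.List.pyGet?_natCast]
  simp [List.getD_eq_getElem?_getD, List.getElem?_eq_getElem hlt]

lemma pvColBEq (p : List Int) (row : List String) (j : Int) (s : String) (c : Char)
    (hg : PySem.List.pyGet? row j = some s) (hc : PySem.Str.pyGet? s 0 = some c) :
    pvColB p row j = pvBumpChar p c := by
  unfold pvColB
  rw [hg]
  dsimp only
  rw [hc]

lemma pvMainFold (data : List (List String))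
    (h : ∀ row ∈ data, 4 ≤ row.length ∧ row.getD 1 "" ≠ "" ∧ row.getD 2 "" ≠ "" ∧ row.getD 3 "" ≠ "") :
    ∀ (l1 l2 l3 : List Int), l1.length = 10 → l2.length = 10 → l3.length = 10 →
    data.foldl pvStepA (mkCL l1, mkCL l2, mkCL l3)
      = (mkCL (data.foldl (fun (st : List Int × List Int × List Int) row =>
            (pvColB st.1 row 1, pvColB st.2.1 row 2, pvColB st.2.2 row 3)) (l1, l2, l3)).1,
         mkCL (data.foldl (fun (st : List Int × List Int × List Int) row =>
            (pvColB st.1 row 1, pvColB st.2.1 row 2, pvColB st.2.2 row 3)) (l1, l2, l3)).2.1,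
         mkCL (data.foldl (fun (st : List Int × List Int × List Int) row =>
            (pvColB st.1 row 1, pvColB st.2.1 row 2, pvColB st.2.2 row 3)) (l1, l2, l3)).2.2) := by
  induction data with
  | nil => intro l1 l2 l3 _ _ _; rfl
  | cons row rest ih =>
    intro l1 l2 l3 hl1 hl2 hl3
    obtain ⟨h4, hne1, hne2, hne3⟩ := h row (List.mem_cons_self ..)
    obtain ⟨c1, hc1⟩ := pvHead _ hne1
    obtain ⟨c2, hc2⟩ := pvHead _ hne2
    obtain ⟨c3, hc3⟩ := pvHead _ hne3
    have hg1 : PySem.List.pyGet? row (1 : Int) = some (row.getD 1 "") := by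
      simpa using pvRowGet row h4 1 (by omega)
    have hg2 : PySem.List.pyGet? row (2 : Int) = some (row.getD 2 "") := by
      simpa using pvRowGet row h4 2 (by omega)
    have hg3 : PySem.List.pyGet? row (3 : Int) = some (row.getD 3 "") := by
      simpa using pvRowGet row h4 3 (by omega)
    have hstep : pvStepA (mkCL l1, mkCL l2, mkCL l3) row
        = (mkCL (pvBumpChar l1 c1), mkCL (pvBumpChar l2 c2), mkCL (pvBumpChar l3 c3)) := by
      unfold pvStepA
      rw [hg1, hg2, hg3]
      dsimp only
      rw [pvStepL l1 hl1 _ c1 hc1, pvStepL l2 hl2 _ c2 hc2, pvStepL l3 hl3 _ c3 hc3]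
    have hcol1 : pvColB l1 row 1 = pvBumpChar l1 c1 := pvColBEq l1 row 1 _ c1 hg1 hc1
    have hcol2 : pvColB l2 row 2 = pvBumpChar l2 c2 := pvColBEq l2 row 2 _ c2 hg2 hc2
    have hcol3 : pvColB l3 row 3 = pvBumpChar l3 c3 := pvColBEq l3 row 3 _ c3 hg3 hc3
    simp only [List.foldl_cons, hstep, hcol1, hcol2, hcol3]
    exact ih (fun r hr => h r (List.mem_cons_of_mem _ hr)) _ _ _
      (by rw [pvBumpLen]; exact hl1) (by rw [pvBumpLen]; exact hl2) (by rw [pvBumpLen]; exact hl3)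

lemma pvToListEq (l : List Int) (hl : l.length = 10) : pvToList (mkCL l) = l := by
  obtain ⟨a0,a1,a2,a3,a4,a5,a6,a7,a8,a9, rfl⟩ := pvTen l hl
  simp [pvToList, mkCL, PySem.Dict.keys, PySem.Dict.getD, PySem.Dict.get?,
    PySem.List.pySetD, PySem.List.pySet?, PySem.List.pyIdx?, PySem.Int.ofStr?,
    pvI0,pvI1,pvI2,pvI3,pvI4,pvI5,pvI6,pvI7,pvI8,pvI9]

lemma pvFoldLen (data : List (List String)) :
    ∀ (l1 l2 l3 : List Int),
    let fin := data.foldl (fun (st : List Int × List Int × List Int) row =>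
        (pvColB st.1 row 1, pvColB st.2.1 row 2, pvColB st.2.2 row 3)) (l1, l2, l3)
    fin.1.length = l1.length ∧ fin.2.1.length = l2.length ∧ fin.2.2.length = l3.length := by
  induction data with
  | nil => intro l1 l2 l3; exact ⟨rfl, rfl, rfl⟩
  | cons row rest ih =>
    intro l1 l2 l3
    have hcl : ∀ (p : List Int) (i : Int), (pvColB p row i).length = p.length := by
      intro p i
      unfold pvColB
      cases hg : PySem.List.pyGet? row i with
      | none => rfl
      | some s =>
        dsimp only
        cases hc : PySem.Str.pyGet? s 0 with
        | none => rfl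
        | some c => exact pvBumpLen p c
    simpa [List.foldl_cons, hcl] using ih (pvColB l1 row 1) (pvColB l2 row 2) (pvColB l3 row 3)

-- ===== VERDICT (by name: the statement is the Claim_ definition above) =====
theorem count5D_numrange_spec : Claim_equal_count5D_numrange := by
  intro data _ hpre
  unfold Spec_count5D_numrange count5D_numrange count5D_numrange_alt
  have hbase : pvBaseCtr = mkCL [0,0,0,0,0,0,0,0,0,0] := by decide
  rw [hbase, pvMainFold data hpre [0,0,0,0,0,0,0,0,0,0] [0,0,0,0,0,0,0,0,0,0] [0,0,0,0,0,0,0,0,0,0]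
    rfl rfl rfl]
  obtain ⟨hL1, hL2, hL3⟩ := pvFoldLen data [0,0,0,0,0,0,0,0,0,0] [0,0,0,0,0,0,0,0,0,0] [0,0,0,0,0,0,0,0,0,0]
  simp only [pvToListEq _ hL1, pvToListEq _ hL2, pvToListEq _ hL3]
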